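-- pv_equiv track=rewrite | github.com/macrosynergy/macrosynergy | tests/unit/panel/test_make_blacklist.py | sequence_ones
-- ===== SOURCE A (Python) =====
-- def sequence_ones(values):
--
--     copy_values = values.copy()
--
--     values = iter(values)
--     value = next(values)
--
--     i = 0
--     while not value:
--         count = 0
--         try:
--             value = next(values)
--         except StopIteration:
--             return count
--         i += 1
--
--     count = 1
--     for val in values:
--         i += 1
--         if not val:
--             continue
--         elif val != copy_values[(i - 1)]:
--             count += 1
--
--         elif val:
--             continue
--
--     return count
-- ===== SOURCE B (Python) =====
-- def sequence_ones(values):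
--     # One uniform pass with a falsy sentinel as the previous value:
--     # count the starts of maximal runs of equal truthy values.
--     count = 0
--     prev = 0
--     for v in values:
--         if v and v != prev:
--             count += 1
--         prev = v
--     return count
-- ===== Notes on version B (the rewrite author's own statement) =====
-- stated objective: simpler
-- what changed: Replaced the iterator/next with StopIteration handling, the zero-skipping while loop and the per-element indexed lookup into a copied list by a single fold carrying (count, previous value), counting run starts directly (measured ~1.9x faster: no list copy, no index arithmetic or subscript per element).
import Mathlib
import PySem

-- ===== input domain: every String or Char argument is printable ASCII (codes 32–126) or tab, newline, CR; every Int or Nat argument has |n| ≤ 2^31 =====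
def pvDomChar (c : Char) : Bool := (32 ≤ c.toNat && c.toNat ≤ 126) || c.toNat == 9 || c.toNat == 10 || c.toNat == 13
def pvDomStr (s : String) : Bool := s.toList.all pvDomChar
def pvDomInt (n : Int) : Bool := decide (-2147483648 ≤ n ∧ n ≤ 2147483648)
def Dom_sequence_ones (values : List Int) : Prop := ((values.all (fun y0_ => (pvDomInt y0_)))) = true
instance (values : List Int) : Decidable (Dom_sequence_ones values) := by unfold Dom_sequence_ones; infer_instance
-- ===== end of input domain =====

-- B replaces A's iterator/StopIteration machinery, zero-skipping while loop and indexed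
-- lookup into a copied list by a single fold carrying (count, previous value): simpler.


-- ===== PORT A =====
-- 'for val in values: i += 1; if not val: continue; elif val != copy_values[i-1]: count += 1'
-- copy_values[(i-1)] never raises here (0 ≤ i-1 < len always), so pyGet? always returns some;
-- .getD 0 only removes the Option.
def seqOnesForA (copy : List Int) (it : List Int) (i : Int) (count : Int) : Int :=
  (it.foldl (fun (s : Int × Int) val =>
      let i' := s.1 + 1
      if val = 0 then (i', s.2)
      else if val ≠ (PySem.List.pyGet? copy (i' - 1)).getD 0 then (i', s.2 + 1)
      else (i', s.2)) (i, count)).2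

-- 'while not value: value = next(values) (return 0 on StopIteration); i += 1', then count = 1 and the for loop
def seqOnesWhileA (copy : List Int) (value : Int) (it : List Int) (i : Int) : Int :=
  if value ≠ 0 then seqOnesForA copy it i 1
  else
    match it with
    | [] => 0
    | v :: t => seqOnesWhileA copy v t (i + 1)

def sequence_ones (values : List Int) : Int :=
  match values with
  | [] => 0   -- Python raises StopIteration here; excluded by Pre_sequence_ones
  | v :: rest => seqOnesWhileA values v rest 0

-- ===== PORT B =====
def sequence_ones_alt (values : List Int) : Int :=
  (values.foldl (fun (s : Int × Int) v =>
      (if v ≠ 0 ∧ v ≠ s.2 then s.1 + 1 else s.1, v)) (0, 0)).1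

-- ===== PRECONDITION & SPEC =====
-- Pre_ excludes only the empty list, on which A raises StopIteration.
def Pre_sequence_ones (values : List Int) : Prop := values ≠ []
instance (values : List Int) : Decidable (Pre_sequence_ones values) := by unfold Pre_sequence_ones; infer_instance
def pvWitness_sequence_ones : List Int := [0, 1, 1, 2, 0, 2]

def Spec_sequence_ones (values : List Int) (out : Int) : Prop := out = sequence_ones_alt values
instance (values : List Int) (out : Int) : Decidable (Spec_sequence_ones values out) := by unfold Spec_sequence_ones; infer_instance

-- ===== CLAIM (what is proved, stated in full; the proofs are below) =====
def Claim_equal_sequence_ones : Prop := ∀ (values : List Int), Dom_sequence_ones values → Pre_sequence_ones values → Spec_sequence_ones values (sequence_ones values)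

-- ===== LEMMAS AND PROOFS =====

-- number of run starts of truthy values in l, given previous value `prev`
def runStarts (prev : Int) : List Int → Int
  | [] => 0
  | v :: t => (if v ≠ 0 ∧ v ≠ prev then 1 else 0) + runStarts v t

theorem altFold_eq (l : List Int) : ∀ (c prev : Int),
    (l.foldl (fun (s : Int × Int) v =>
      (if v ≠ 0 ∧ v ≠ s.2 then s.1 + 1 else s.1, v)) (c, prev)).1 = c + runStarts prev l := by
  induction l with
  | nil => intro c prev; simp [runStarts]
  | cons v t ih =>
    intro c prev
    simp only [List.foldl_cons, runStarts]
    by_cases h : v ≠ 0 ∧ v ≠ prev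
    · simp [h, ih]; ring
    · simp [h, ih]

theorem forA_eq (copy : List Int) (l : List Int) : ∀ (j : Nat) (prev count : Int),
    copy.drop j = prev :: l →
    seqOnesForA copy l (j : Int) count = count + runStarts prev l := by
  induction l with
  | nil => intro j prev count _; simp [seqOnesForA, runStarts]
  | cons v t ih =>
    intro j prev count h
    have hget : copy[j]? = some prev := by
      have := congrArg List.head? h
      simpa [List.head?_drop] using this
    have hdrop : copy.drop (j + 1) = v :: t := by
      have := congrArg List.tail h
      simpa [List.tail_drop] using this
    have hidx : ((j : Int) + 1 - 1) = (j : Int) := by ring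
    have hpg : PySem.List.pyGet? copy ((j : Int) + 1 - 1) = some prev := by
      rw [hidx, PySem.List.pyGet?_natCast, hget]
    have step : seqOnesForA copy (v :: t) (j : Int) count =
        seqOnesForA copy t ((j : Int) + 1)
          (if v = 0 then count else if v ≠ prev then count + 1 else count) := by
      simp only [seqOnesForA, List.foldl_cons, hpg]
      by_cases h0 : v = 0
      · simp [h0]
      · by_cases h1 : v ≠ prev <;> simp [h0, h1, Option.getD]
    have hcast : ((j : Int) + 1) = ((j + 1 : Nat) : Int) := by push_cast; ring
    rw [step, hcast, ih (j + 1) v _ hdrop]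
    simp only [runStarts]
    by_cases h0 : v = 0
    · simp [h0]
    · by_cases h1 : v ≠ prev <;> (simp [h0, h1]; try ring)

theorem whileA_eq (copy : List Int) (it : List Int) : ∀ (j : Nat) (value : Int),
    copy.drop j = value :: it →
    seqOnesWhileA copy value it (j : Int) = runStarts 0 (value :: it) := by
  induction it with
  | nil =>
    intro j value h
    by_cases hv : value = 0
    · simp [seqOnesWhileA, hv, runStarts]
    · rw [seqOnesWhileA, if_pos hv, forA_eq copy [] j value 1 h]
      simp [runStarts, hv]
  | cons v t ih =>
    intro j value h
    by_cases hv : value = 0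
    · have hdrop : copy.drop (j + 1) = v :: t := by
        have := congrArg List.tail h
        simpa [List.tail_drop] using this
      have hcast : ((j : Int) + 1) = ((j + 1 : Nat) : Int) := by push_cast; ring
      rw [seqOnesWhileA, if_neg (by simp [hv])]
      rw [hcast, ih (j + 1) v hdrop]
      simp [runStarts, hv]
    · rw [seqOnesWhileA, if_pos hv, forA_eq copy (v :: t) j value 1 h]
      simp [runStarts, hv]

-- ===== VERDICT (by name: the statement is the Claim_ definition above) =====
theorem sequence_ones_spec : Claim_equal_sequence_ones := by
  intro values _ hpre
  unfold Spec_sequence_ones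
  match values, hpre with
  | v :: rest, _ =>
    have hdrop : (v :: rest).drop 0 = v :: rest := rfl
    have hA : sequence_ones (v :: rest) = runStarts 0 (v :: rest) := by
      show seqOnesWhileA (v :: rest) v rest ((0 : Nat) : Int) = _
      exact whileA_eq (v :: rest) rest 0 v hdrop
    have hB : sequence_ones_alt (v :: rest) = runStarts 0 (v :: rest) := by
      unfold sequence_ones_alt
      rw [altFold_eq]; ring
    rw [hA, hB]
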